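-- pv_equiv track=rewrite | github.com/MikeSWang/Harmonia | harmonia/utils.py | _allocate_tasks
-- ===== SOURCE A (Python) =====
-- def _allocate_tasks(total_task, total_proc):
--     """Allocate tasks to processes for parallel computation.
--
--     If `total_proc` processes share `total_task` tasks, then this decides
--     the numbers of tasks, `tasks`, different processes receive: the
--     rank-``i`` process receives ``tasks[i]`` many tasks.
--
--     Parameters
--     ----------
--     total_task : int
--         Total number of tasks.
--     total_proc : int
--         Total number of processes.
--
--     Returns
--     -------
--     tasks : list of int
--         Number of tasks for each process.
--
--     """
--     try:
--         total_task, total_proc = map(int, (total_task, total_proc))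
--     except TypeError as err:
--         raise TypeError(
--             "`total_task` and `total_proc` must have integer values."
--         ) from err
--
--     num_task_remaining, num_proc_remaining, tasks = total_task, total_proc, []
--
--     while num_task_remaining > 0:
--         num_task_assigned = num_task_remaining // num_proc_remaining
--         tasks.append(num_task_assigned)
--         num_task_remaining -= num_task_assigned
--         num_proc_remaining -= 1
--
--     return tasks
-- ===== SOURCE B (Python) =====
-- def _allocate_tasks(total_task, total_proc):
--     """Allocate tasks to processes for parallel computation (closed form)."""
--     try:
--         total_task, total_proc = map(int, (total_task, total_proc))
--     except TypeError as err:
--         raise TypeError(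
--             "`total_task` and `total_proc` must have integer values."
--         ) from err
--
--     if total_task <= 0:
--         return []
--
--     num_each, num_extra = divmod(total_task, total_proc)
--     return [num_each] * (total_proc - num_extra) + [num_each + 1] * num_extra
-- ===== Notes on version B (the rewrite author's own statement) =====
-- stated objective: simpler
-- what changed: Replaces A's shrinking-remainder while-loop (one floor division and one list append per process) with a single divmod and a closed-form list build via list repetition.
import Mathlib
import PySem

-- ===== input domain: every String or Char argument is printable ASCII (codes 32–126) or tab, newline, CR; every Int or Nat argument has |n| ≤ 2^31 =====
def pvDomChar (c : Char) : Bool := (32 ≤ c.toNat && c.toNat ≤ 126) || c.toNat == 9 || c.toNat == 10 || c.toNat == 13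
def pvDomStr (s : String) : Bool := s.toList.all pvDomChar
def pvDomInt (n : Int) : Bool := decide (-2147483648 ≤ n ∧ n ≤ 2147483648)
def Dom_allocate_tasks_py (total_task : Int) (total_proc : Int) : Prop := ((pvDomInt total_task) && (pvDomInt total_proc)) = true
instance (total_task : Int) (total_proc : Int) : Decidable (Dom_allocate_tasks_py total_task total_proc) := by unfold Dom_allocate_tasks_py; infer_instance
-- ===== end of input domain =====

-- B replaces A's shrinking-remainder while-loop by one divmod and a closed-form list build (objective: simpler).


-- ===== PORT A =====
-- while-loop of A, fuel-bounded (inside Pre_ the loop runs at most total_proc times)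
def allocLoopA (fuel : Nat) (num_task_remaining : Int) (num_proc_remaining : Int)
    (tasks : List Int) : List Int :=
  match fuel with
  | 0 => tasks
  | fuel + 1 =>
    if num_task_remaining > 0 then
      let num_task_assigned := PySem.Int.floordiv num_task_remaining num_proc_remaining
      allocLoopA fuel (num_task_remaining - num_task_assigned) (num_proc_remaining - 1)
        (tasks ++ [num_task_assigned])
    else tasks

def allocate_tasks_py (total_task : Int) (total_proc : Int) : List Int :=
  allocLoopA total_proc.toNat total_task total_proc []

-- ===== PORT B =====
def allocate_tasks_py_alt (total_task : Int) (total_proc : Int) : List Int :=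
  if total_task ≤ 0 then []
  else
    let num_each := PySem.Int.floordiv total_task total_proc
    let num_extra := PySem.Int.mod total_task total_proc
    List.replicate (total_proc - num_extra).toNat num_each ++
      List.replicate num_extra.toNat (num_each + 1)

-- ===== PRECONDITION & SPEC =====
-- Pre_ excludes only inputs where A does not return: total_task > 0 with total_proc = 0
-- raises ZeroDivisionError, and total_task > 0 with total_proc < 0 loops forever.
def Pre_allocate_tasks_py (total_task : Int) (total_proc : Int) : Prop :=
  total_task ≤ 0 ∨ 0 < total_proc
instance (total_task : Int) (total_proc : Int) : Decidable (Pre_allocate_tasks_py total_task total_proc) := by unfold Pre_allocate_tasks_py; infer_instance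

def pvWitness_allocate_tasks_py : Int × Int := (7, 3)

def Spec_allocate_tasks_py (total_task : Int) (total_proc : Int) (out : List Int) : Prop := out = allocate_tasks_py_alt total_task total_proc
instance (total_task : Int) (total_proc : Int) (out : List Int) : Decidable (Spec_allocate_tasks_py total_task total_proc out) := by unfold Spec_allocate_tasks_py; infer_instance

-- ===== CLAIM (what is proved, stated in full; the proofs are below) =====
def Claim_equal_allocate_tasks_py : Prop := ∀ (total_task : Int) (total_proc : Int), Dom_allocate_tasks_py total_task total_proc → Pre_allocate_tasks_py total_task total_proc → Spec_allocate_tasks_py total_task total_proc (allocate_tasks_py total_task total_proc)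

-- ===== LEMMAS AND PROOFS =====

lemma alt_of_pos {t p : Int} (ht : 0 < t) (hp : 0 < p) :
    allocate_tasks_py_alt t p =
      List.replicate (p - t % p).toNat (t / p) ++ List.replicate (t % p).toNat (t / p + 1) := by
  unfold allocate_tasks_py_alt
  rw [if_neg (by omega), PySem.Int.floordiv_eq_ediv_of_pos hp, PySem.Int.mod_eq_emod_of_pos hp]

-- Loop invariant: with fuel = procs and positive procs, the loop appends exactly the closed form.
lemma loop_eq (p : Nat) : ∀ (rem : Int) (acc : List Int), 0 ≤ rem → (0 < rem → 0 < p) →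
    allocLoopA p rem (p : Int) acc =
      acc ++ (if rem ≤ 0 then ([] : List Int)
        else List.replicate (((p : Int) - rem % p).toNat) (rem / p) ++
          List.replicate ((rem % p).toNat) (rem / p + 1)) := by
  induction p with
  | zero =>
    intro rem acc h0 hpos
    have : rem = 0 := by omega
    subst this
    simp [allocLoopA]
  | succ n ih =>
    intro rem acc h0 hpos
    by_cases hr : rem ≤ 0
    · have : rem = 0 := by omega
      subst this
      simp [allocLoopA]
    · push_neg at hr
      have hp : (0 : Int) < (n : Int) + 1 := by positivity
      push_cast
      rw [if_neg (by omega)]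
      unfold allocLoopA
      rw [if_pos (by omega)]
      show allocLoopA n (rem - PySem.Int.floordiv rem ((n : Int) + 1)) (((n : Int) + 1) - 1)
          (acc ++ [PySem.Int.floordiv rem ((n : Int) + 1)]) = _
      have hfd : PySem.Int.floordiv rem ((n : Int) + 1) = rem / ((n : Int) + 1) :=
        PySem.Int.floordiv_eq_ediv_of_pos hp
      set q := rem / ((n : Int) + 1) with hq
      set r := rem % ((n : Int) + 1) with hrr
      have hq0 : 0 ≤ q := Int.ediv_nonneg h0 (by omega)
      have hr0 : 0 ≤ r := Int.emod_nonneg rem (by omega)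
      have hrlt : r < (n : Int) + 1 := Int.emod_lt_of_pos rem hp
      have hdecomp : rem = q * ((n : Int) + 1) + r := by
        rw [hq, hrr]
        linarith [Int.ediv_add_emod rem ((n : Int) + 1)]
      have hrem' : rem - q = q * n + r := by linarith [hdecomp]
      have hstep : ((n : Int) + 1) - 1 = (n : Int) := by ring
      rw [hfd, hrem', hstep]
      rw [ih (q * n + r) (acc ++ [q])
        (by positivity)
        (by intro h; by_contra hn
            have hn0 : n = 0 := by omega
            subst hn0; simp at h hrlt; omega)]
      by_cases hz : q * n + r ≤ 0
      · -- remainder zero after first step: q*n = 0 and r = 0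
        have hqn : q * (n : Int) = 0 := by nlinarith
        have hr00 : r = 0 := by nlinarith
        have hn0 : (n : Nat) = 0 := by
          by_contra hn
          have hn1 : (1 : Int) ≤ (n : Int) := by omega
          have hq00 : q = 0 := by nlinarith
          omega
        subst hn0
        simp only [if_pos hz, List.append_nil, List.append_assoc]
        simp [hr00, List.replicate]
      · push_neg at hz
        have hn1 : 0 < (n : Int) := by
          by_contra hn
          have : (n : Int) = 0 := by omega
          rw [this] at hz; simp at hz; omega
        rw [if_neg (by omega)]
        by_cases hcase : r < (n : Int)
        · -- r stays the remainder mod n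
          have hdiv : (q * n + r) / (n : Int) = q := by
            rw [add_comm, Int.add_mul_ediv_right r q (by omega : (n : Int) ≠ 0)]
            rw [Int.ediv_eq_zero_of_lt hr0 hcase]; ring
          have hmod : (q * n + r) % (n : Int) = r := by
            rw [add_comm, Int.add_mul_emod_self_right]
            exact Int.emod_eq_of_lt hr0 hcase
          rw [hdiv, hmod]
          have hcount : ((n : Int) - r).toNat + 1 = (((n : Int) + 1) - r).toNat := by omega
          rw [List.append_assoc]
          congr 1
          rw [← hcount, List.replicate_succ]
          simp
        · -- r = n : everyone gets q+1 from here on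
          have hre : r = (n : Int) := by omega
          have hdec : q * (n : Int) + r = (q + 1) * n := by rw [hre]; ring
          have hdiv : (q * n + r) / (n : Int) = q + 1 := by
            rw [hdec, Int.mul_ediv_cancel _ (by omega)]
          have hmod : (q * n + r) % (n : Int) = 0 := by
            rw [hdec, Int.mul_emod_left]
          rw [hdiv, hmod]
          have h1 : (((n : Int) + 1) - r).toNat = 1 := by omega
          have h2 : ((n : Int) - 0).toNat = (n : Nat) := by omega
          rw [h1, h2]
          simp [List.replicate, hre, List.append_assoc]

-- ===== VERDICT (by name: the statement is the Claim_ definition above) =====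
theorem allocate_tasks_py_spec : Claim_equal_allocate_tasks_py := by
  intro t p _ hpre
  unfold Spec_allocate_tasks_py allocate_tasks_py
  by_cases ht : t ≤ 0
  · unfold allocate_tasks_py_alt
    rw [if_pos ht]
    cases hn : p.toNat with
    | zero => simp [allocLoopA]
    | succ n => simp [allocLoopA, if_neg (by omega : ¬ t > 0)]
  · push_neg at ht
    have hp : 0 < p := by rcases hpre with h | h; omega; exact h
    have hcast : ((p.toNat : Int)) = p := by omega
    rw [alt_of_pos ht hp]
    have := loop_eq p.toNat t [] (by omega) (by intro _; omega)
    rw [hcast] at this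
    rw [this, if_neg (by omega)]
    simp
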